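-- pv_equiv track=rewrite | github.com/Buntry/adventofcode-2025 | day4/day4.py | grid_neighbor_positions
-- ===== SOURCE A (Python) =====
-- def grid_neighbor_positions(row, col, width, height):
--     relative_shifts = [(-1, -1), (-1, 0), (-1, 1), (0, -1), (0, 1), (1, -1), (1, 0), (1, 1)]
--     for shift_row, shift_col in relative_shifts:
--         new_row = row + shift_row
--         new_col = col + shift_col
--
--         if new_row < 0 or new_row >= height:
--             continue
--         elif new_col < 0 or new_col >= width:
--             continue
--
--         yield new_row, new_col
-- ===== SOURCE B (Python) =====
-- def grid_neighbor_positions(row, col, width, height):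
--     # Clamp to the valid neighbor rectangle and traverse it directly,
--     # skipping the center cell, instead of generating-and-discarding shifts.
--     for r in range(max(0, row - 1), min(height, row + 2)):
--         for c in range(max(0, col - 1), min(width, col + 2)):
--             if (r, c) != (row, col):
--                 yield r, c
-- ===== Notes on version B (the rewrite author's own statement) =====
-- stated objective: alternative
-- what changed: Instead of iterating a fixed 8-shift list and filtering each candidate with bounds checks, B clamps the neighbor rectangle with max/min and walks only the in-bounds cells with two nested range loops, skipping the center.
import Mathlib
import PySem

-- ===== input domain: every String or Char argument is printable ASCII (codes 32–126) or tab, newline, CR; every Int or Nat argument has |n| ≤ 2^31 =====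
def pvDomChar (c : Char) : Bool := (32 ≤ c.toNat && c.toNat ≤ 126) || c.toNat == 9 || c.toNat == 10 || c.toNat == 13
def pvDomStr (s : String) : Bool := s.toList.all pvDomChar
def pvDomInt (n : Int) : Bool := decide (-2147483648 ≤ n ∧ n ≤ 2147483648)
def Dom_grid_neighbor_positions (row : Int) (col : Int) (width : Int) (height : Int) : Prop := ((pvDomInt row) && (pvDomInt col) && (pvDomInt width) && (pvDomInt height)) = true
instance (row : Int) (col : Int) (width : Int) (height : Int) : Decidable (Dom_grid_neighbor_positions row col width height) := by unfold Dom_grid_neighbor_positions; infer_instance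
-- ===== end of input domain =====

-- B replaces A's fixed 8-shift list with bounds filtering by a clamped neighbor rectangle
-- traversed by two nested ranges, skipping the center (alternative decomposition, same cost).


-- ===== PORT A =====
def grid_neighbor_positions (row : Int) (col : Int) (width : Int) (height : Int) : List (Int × Int) :=
  [((-1 : Int), (-1 : Int)), (-1, 0), (-1, 1), (0, -1), (0, 1), (1, -1), (1, 0), (1, 1)].foldl
    (fun acc s =>
      let new_row := row + s.1
      let new_col := col + s.2
      if new_row < 0 ∨ new_row ≥ height then acc
      else if new_col < 0 ∨ new_col ≥ width then acc
      else acc ++ [(new_row, new_col)])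
    []

-- ===== PORT B =====
def grid_neighbor_positions_alt (row : Int) (col : Int) (width : Int) (height : Int) : List (Int × Int) :=
  (PySem.List.pyRange (max 0 (row - 1)) (min height (row + 2)) 1).foldl
    (fun acc r =>
      (PySem.List.pyRange (max 0 (col - 1)) (min width (col + 2)) 1).foldl
        (fun acc2 c => if (r, c) ≠ (row, col) then acc2 ++ [(r, c)] else acc2)
        acc)
    []

-- ===== PRECONDITION & SPEC =====
def Spec_grid_neighbor_positions (row : Int) (col : Int) (width : Int) (height : Int) (out : List (Int × Int)) : Prop := out = grid_neighbor_positions_alt row col width height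
instance (row : Int) (col : Int) (width : Int) (height : Int) (out : List (Int × Int)) : Decidable (Spec_grid_neighbor_positions row col width height out) := by unfold Spec_grid_neighbor_positions; infer_instance

-- ===== CLAIM (what is proved, stated in full; the proofs are below) =====
def Claim_equal_grid_neighbor_positions : Prop := ∀ (row : Int) (col : Int) (width : Int) (height : Int), Dom_grid_neighbor_positions row col width height → Spec_grid_neighbor_positions row col width height (grid_neighbor_positions row col width height)

-- ===== LEMMAS AND PROOFS =====

-- a range of length at most 3, written out explicitly
theorem pyRange_small (a b : Int) (h : b - a ≤ 3) :
    PySem.List.pyRange a b 1 =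
      if a < b then
        (if a + 1 < b then (if a + 2 < b then [a, a + 1, a + 2] else [a, a + 1]) else [a])
      else [] := by
  have e : a + 1 + 1 = a + 2 := by ring
  split_ifs with h1 h2 h3
  · rw [PySem.List.pyRange_one_cons h1, PySem.List.pyRange_one_cons h2, e,
      PySem.List.pyRange_one_cons h3, PySem.List.pyRange_one_eq_nil (by omega)]
  · rw [PySem.List.pyRange_one_cons h1, PySem.List.pyRange_one_cons h2, e,
      PySem.List.pyRange_one_eq_nil (by omega)]
  · rw [PySem.List.pyRange_one_cons h1, PySem.List.pyRange_one_eq_nil (by omega)]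
  · exact PySem.List.pyRange_one_eq_nil (by omega)

-- the clamped range equals the three candidates, each filtered by A's bounds test
theorem range3 (x h : Int) :
    PySem.List.pyRange (max 0 (x - 1)) (min h (x + 2)) 1 =
      (if x + -1 < 0 ∨ x + -1 ≥ h then [] else [x + -1]) ++
      (if x + 0 < 0 ∨ x + 0 ≥ h then [] else [x + 0]) ++
      (if x + 1 < 0 ∨ x + 1 ≥ h then [] else [x + 1]) := by
  rw [pyRange_small _ _ (by omega)]
  split_ifs <;>
    first
      | omega
      | (simp only [List.cons_append, List.nil_append, List.append_nil, List.cons.injEq,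
          and_true] <;> omega)

set_option maxHeartbeats 4000000 in
theorem grid_neighbor_positions_eq (row col width height : Int) :
    grid_neighbor_positions row col width height = grid_neighbor_positions_alt row col width height := by
  unfold grid_neighbor_positions grid_neighbor_positions_alt
  rw [range3 row height, range3 col width]
  have er1 : row + -1 ≠ row := by omega
  have er2 : row + 1 ≠ row := by omega
  have ec1 : col + -1 ≠ col := by omega
  have ec2 : col + 1 ≠ col := by omega
  by_cases h1 : row + -1 < 0 ∨ row + -1 ≥ height <;>
  by_cases h2 : row + 0 < 0 ∨ row + 0 ≥ height <;>
  by_cases h3 : row + 1 < 0 ∨ row + 1 ≥ height <;>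
  by_cases h4 : col + -1 < 0 ∨ col + -1 ≥ width <;>
  by_cases h5 : col + 0 < 0 ∨ col + 0 ≥ width <;>
  by_cases h6 : col + 1 < 0 ∨ col + 1 ≥ width <;>
  (simp only [List.foldl_cons, List.foldl_nil, h1, h2, h3, h4, h5, h6, if_true, if_false,
      ite_true, ite_false, List.nil_append, List.cons_append, List.append_nil];
    try simp [Prod.mk.injEq, er1, er2, ec1, ec2])

-- ===== VERDICT (by name: the statement is the Claim_ definition above) =====
theorem grid_neighbor_positions_spec : Claim_equal_grid_neighbor_positions := by
  intro row col width height _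
  exact grid_neighbor_positions_eq row col width height
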